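-- pv_equiv track=rewrite | github.com/joshanashakya/dissertation | workspace/dataset/java-python/CodeForces/1506/B/solution2.py | answer
-- ===== SOURCE A (Python) =====
-- def answer(st, k):
--     ss, es = st.find('*'), st.rfind('*')
--     count = 1
--     i = ss
--
--     while i < es:
--         if st[i] == '*': count += 1
--         nextStar = min(len(st) - 1, i + k)
--         while st[nextStar] != '*': nextStar -= 1
--         i = nextStar
--
--     return count
-- ===== SOURCE B (Python) =====
-- def answer(st, k):
--     pos = [j for j in range(len(st)) if st[j] == '*']
--     if len(pos) <= 1:
--         return 1
--     count = 1
--     t = 0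
--     last = len(pos) - 1
--     while t < last:
--         j = t
--         while j + 1 <= last and pos[j + 1] <= pos[t] + k:
--             j += 1
--         t = j
--         count += 1
--     return count
-- ===== Notes on version B (the rewrite author's own statement) =====
-- stated objective: alternative
-- what changed: B precomputes the list of star positions once and runs the greedy as a forward two-pointer walk over that index list, replacing A's find/rfind calls and repeated backward character-by-character scans of the string.
import Mathlib
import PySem

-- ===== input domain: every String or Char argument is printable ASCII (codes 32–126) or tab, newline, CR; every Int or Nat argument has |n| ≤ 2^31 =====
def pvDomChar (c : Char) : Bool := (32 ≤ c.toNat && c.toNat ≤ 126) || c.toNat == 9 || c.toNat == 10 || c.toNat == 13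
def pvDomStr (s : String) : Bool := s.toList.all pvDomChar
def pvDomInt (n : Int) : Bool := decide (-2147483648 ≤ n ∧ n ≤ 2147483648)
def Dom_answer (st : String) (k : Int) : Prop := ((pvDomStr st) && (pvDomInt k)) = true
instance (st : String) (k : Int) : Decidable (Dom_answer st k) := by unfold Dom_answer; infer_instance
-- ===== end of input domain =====

-- B replaces A's find/rfind and repeated backward character scans by one precomputed list of
-- star positions walked forward with two indices (objective: alternative; same asymptotic cost).

-- ===== PORT A =====
-- literal port of A; the two while-loops are carried by fuel (none = IndexError or fuel
-- exhausted; under Pre_answer the supplied fuel is proved sufficient, see lemmas below)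

-- inner loop: while st[nextStar] != '*': nextStar -= 1
def scanBackA (cs : List Char) : Int → Nat → Option Int
  | _, 0 => none
  | j, fuel+1 =>
    match PySem.List.pyGet? cs j with
    | none => none
    | some c => if c = '*' then some j else scanBackA cs (j-1) fuel

-- outer loop: while i < es: …
def loopA (cs : List Char) (k es : Int) : Int → Int → Nat → Option Int
  | _, _, 0 => none
  | i, count, fuel+1 =>
    if i < es then
      let count' := if PySem.List.pyGet? cs i = some '*' then count + 1 else count
      match scanBackA cs (min ((cs.length : Int) - 1) (i + k)) (2 * cs.length + 2) with
      | none => none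
      | some ns => loopA cs k es ns count' fuel
    else some count

def answer (st : String) (k : Int) : Int :=
  let cs := st.toList
  (loopA cs k (PySem.Str.rfind st "*") (PySem.Str.find st "*") 1 (cs.length + 1)).getD 0

-- ===== PORT B =====
-- pos = [j for j in range(len(st)) if st[j] == '*']
def starIdx (cs : List Char) : List Nat :=
  (List.range cs.length).filter (fun j => cs.getD j ' ' = '*')

-- inner loop: while j + 1 <= last and pos[j+1] <= pos[t] + k: j += 1   (terminates; fuel = last suffices)
def innerB (pos : List Int) (bound : Int) (last : Nat) : Nat → Nat → Nat
  | j, 0 => j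
  | j, fuel+1 =>
    if j + 1 ≤ last ∧ pos.getD (j+1) 0 ≤ bound then innerB pos bound last (j+1) fuel else j

-- outer loop: while t < last: …  (fuel = len(pos) suffices under Pre_answer)
def loopB (pos : List Int) (k : Int) (last : Nat) : Nat → Int → Nat → Option Int
  | _, _, 0 => none
  | t, count, fuel+1 =>
    if t < last then
      loopB pos k last (innerB pos (pos.getD t 0 + k) last t last) (count + 1) fuel
    else some count

def answer_alt (st : String) (k : Int) : Int :=
  let pos := (starIdx st.toList).map (fun (j : Nat) => (j : Int))
  if pos.length ≤ 1 then 1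
  else (loopB pos k (pos.length - 1) 0 1 pos.length).getD 0

-- ===== PRECONDITION & SPEC =====
-- Pre_answer is exactly where the Python A returns: with at least two stars it needs k ≥ 1 and
-- every gap between consecutive stars ≤ k; otherwise A loops forever (k ≤ 0 can also reach a
-- negative-index IndexError). No input on which A returns a value is excluded.
def Pre_answer (st : String) (k : Int) : Prop :=
  let P := (List.range st.toList.length).filter (fun j => st.toList.getD j ' ' = '*')
  P.length ≤ 1 ∨
    (1 ≤ k ∧ ∀ i ∈ List.range (P.length - 1), ((P.getD (i+1) 0 : Int) ≤ (P.getD i 0 : Int) + k))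
instance (st : String) (k : Int) : Decidable (Pre_answer st k) := by unfold Pre_answer; infer_instance

def pvWitness_answer : String × Int := ("*a*b*", 2)

def Spec_answer (st : String) (k : Int) (out : Int) : Prop := out = answer_alt st k
instance (st : String) (k : Int) (out : Int) : Decidable (Spec_answer st k out) := by unfold Spec_answer; infer_instance

-- ===== CLAIM (what is proved, stated in full; the proofs are below) =====
def Claim_equal_answer : Prop := ∀ (st : String) (k : Int), Dom_answer st k → Pre_answer st k → Spec_answer st k (answer st k)

-- ===== LEMMAS AND PROOFS =====

theorem mem_starIdx (cs : List Char) (j : Nat) :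
    j ∈ starIdx cs ↔ j < cs.length ∧ cs.getD j ' ' = '*' := by
  simp [starIdx, List.mem_filter, List.mem_range]

theorem starIdx_pairwise (cs : List Char) : (starIdx cs).Pairwise (· < ·) := by
  exact List.Pairwise.sublist List.filter_sublist List.pairwise_lt_range

theorem starIdx_length_le (cs : List Char) : (starIdx cs).length ≤ cs.length := by
  calc (starIdx cs).length ≤ (List.range cs.length).length := List.Sublist.length_le List.filter_sublist
    _ = cs.length := List.length_range

theorem pairwise_head_le {a : Nat} {t : List Nat}
    (hp : (a :: t).Pairwise (· < ·)) {x : Nat} (hx : x ∈ a :: t) : a ≤ x := by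
  rcases List.mem_cons.1 hx with h | h
  · omega
  · exact Nat.le_of_lt ((List.pairwise_cons.1 hp).1 x h)

theorem pairwise_le_getLast {l : List Nat} (hp : l.Pairwise (· < ·)) {x : Nat}
    (hx : x ∈ l) (hne : l ≠ []) : x ≤ l.getLast hne := by
  induction l with
  | nil => simp at hx
  | cons a t ih =>
    cases t with
    | nil => simp at hx; simp [hx, List.getLast]
    | cons b u =>
      rw [List.getLast_cons (by simp)]
      rcases List.mem_cons.1 hx with rfl | hx'
      · have := (List.pairwise_cons.1 hp).1 _ (List.getLast_mem (l := b :: u) (by simp))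
        omega
      · exact ih (List.pairwise_cons.1 hp).2 hx' (by simp)

theorem singleton_prefix {a : Char} {l : List Char} : [a] <+: l ↔ l.head? = some a := by
  constructor
  · rintro ⟨t, rfl⟩; rfl
  · intro h; cases l with
    | nil => simp at h
    | cons b t => simp at h; exact ⟨t, by simp [h]⟩

-- [ '*' ] is a prefix of cs.drop j iff j is a star position
theorem star_prefix_drop (cs : List Char) (j : Nat) :
    [ '*' ] <+: cs.drop j ↔ cs[j]? = some '*' := by
  rw [singleton_prefix, List.head?_drop]

theorem getElem?_star_iff (cs : List Char) (j : Nat) :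
    cs[j]? = some '*' ↔ j ∈ starIdx cs := by
  rw [mem_starIdx]
  constructor
  · intro h
    have hj : j < cs.length := by
      by_contra hn
      rw [List.getElem?_eq_none (by omega)] at h; simp at h
    refine ⟨hj, ?_⟩
    simp [List.getD_eq_getElem?_getD, h]
  · rintro ⟨hj, hs⟩
    rw [List.getD_eq_getElem?_getD, List.getElem?_eq_getElem hj] at hs
    simp at hs
    simp [List.getElem?_eq_getElem hj, hs]

theorem find_star_empty (cs : List Char) (h : starIdx cs = []) :
    PySem.Chars.find cs ['*'] = -1 := by
  rw [PySem.Chars.find_eq_neg_one_iff]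
  intro hin
  have hIn : PySem.Chars.isIn ['*'] cs = true := (PySem.Chars.isIn_iff_infix _ _).2 hin
  obtain ⟨j, hj⟩ := (PySem.Chars.exists_prefix_drop_iff_isIn _ _).2 hIn
  have := (getElem?_star_iff cs j).1 ((star_prefix_drop cs j).1 hj)
  simp [h] at this

theorem find_star_cons (cs : List Char) (h0 : Nat) (tl : List Nat) (h : starIdx cs = h0 :: tl) :
    PySem.Chars.find cs ['*'] = (h0 : Int) := by
  have hmem : h0 ∈ starIdx cs := by rw [h]; exact List.mem_cons_self
  have hpre : ['*'] <+: cs.drop h0 := (star_prefix_drop cs h0).2 ((getElem?_star_iff cs h0).2 hmem)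
  have hinf : ['*'] <:+: cs := by
    have hIn : PySem.Chars.isIn ['*'] cs = true :=
      (PySem.Chars.exists_prefix_drop_iff_isIn _ _).1 ⟨h0, hpre⟩
    exact (PySem.Chars.isIn_iff_infix _ _).1 hIn
  have hnn : 0 ≤ PySem.Chars.find cs ['*'] := (PySem.Chars.find_nonneg_iff _ _).2 hinf
  obtain ⟨hp, hmin⟩ := PySem.Chars.find_spec (s := cs) (sub := ['*']) hnn
  have hfs : (PySem.Chars.find cs ['*']).toNat ∈ starIdx cs :=
    (getElem?_star_iff _ _).1 ((star_prefix_drop _ _).1 hp)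
  have h1 : h0 ≤ (PySem.Chars.find cs ['*']).toNat := by
    have hpw := starIdx_pairwise cs
    rw [h] at hpw hfs
    exact pairwise_head_le hpw hfs
  have h2 : ¬ (h0 < (PySem.Chars.find cs ['*']).toNat) := fun hlt => hmin h0 hlt hpre
  omega

theorem rfindGo_neg (cs : List Char) (m : Nat) (h : ∀ j ∈ starIdx cs, ¬ j ≤ m) :
    PySem.Chars.rfind.go cs ['*'] m = -1 := by
  induction m with
  | zero =>
    have hnp : ¬ (['*'].isPrefixOf cs = true) := by
      intro hp
      have h0 : cs[0]? = some '*' := by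
        have := (List.isPrefixOf_iff_prefix).1 hp
        exact (star_prefix_drop cs 0).1 (by simpa using this)
      exact h 0 ((getElem?_star_iff _ _).1 h0) (le_refl 0)
    simp [PySem.Chars.rfind.go, hnp]
  | succ n ih =>
    have hnp : ¬ (['*'].isPrefixOf (cs.drop (n+1)) = true) := by
      intro hp
      have hs : cs[n+1]? = some '*' :=
        (star_prefix_drop cs (n+1)).1 ((List.isPrefixOf_iff_prefix).1 hp)
      exact h (n+1) ((getElem?_star_iff _ _).1 hs) (le_refl _)
    simp only [PySem.Chars.rfind.go, if_neg hnp]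
    exact ih (fun j hj hle => h j hj (by omega))

theorem rfindGo_pos (cs : List Char) (m r : Nat) (hr : r ∈ starIdx cs) (hrm : r ≤ m)
    (hmax : ∀ j ∈ starIdx cs, j ≤ m → j ≤ r) :
    PySem.Chars.rfind.go cs ['*'] m = (r : Int) := by
  induction m with
  | zero =>
    have hr0 : r = 0 := by omega
    subst hr0
    have hp : ['*'].isPrefixOf cs = true := by
      rw [List.isPrefixOf_iff_prefix]
      simpa using (star_prefix_drop cs 0).2 ((getElem?_star_iff cs 0).2 hr)
    simp [PySem.Chars.rfind.go, hp]
  | succ n ih =>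
    by_cases hs : (n+1) ∈ starIdx cs
    · have hrn : r = n + 1 := by
        have := hmax (n+1) hs (le_refl _)
        omega
      subst hrn
      have hp : ['*'].isPrefixOf (cs.drop (n+1)) = true := by
        rw [List.isPrefixOf_iff_prefix]
        exact (star_prefix_drop cs (n+1)).2 ((getElem?_star_iff cs (n+1)).2 hr)
      simp [PySem.Chars.rfind.go, hp]
    · have hnp : ¬ (['*'].isPrefixOf (cs.drop (n+1)) = true) := by
        intro hp
        exact hs ((getElem?_star_iff _ _).1
          ((star_prefix_drop cs (n+1)).1 ((List.isPrefixOf_iff_prefix).1 hp)))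
      simp only [PySem.Chars.rfind.go, if_neg hnp]
      have hrn : r ≤ n := by
        by_contra hc
        have heq : r = n + 1 := by omega
        exact hs (heq ▸ hr)
      exact ih hrn (fun j hj hle => hmax j hj (by omega))

theorem map_getD (P : List Nat) (t : Nat) (ht : t < P.length) :
    (P.map (fun (j : Nat) => (j : Int))).getD t 0 = ((P.getD t 0 : Nat) : Int) := by
  have hlen : t < (P.map (fun (j : Nat) => (j : Int))).length := by simpa using ht
  rw [List.getD_eq_getElem _ _ hlen, List.getD_eq_getElem _ _ ht, List.getElem_map]

theorem getLast_eq_getD (P : List Nat) (hne : P ≠ []) :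
    P.getLast hne = P.getD (P.length - 1) 0 := by
  have hl : 0 < P.length := List.length_pos_of_ne_nil hne
  rw [List.getLast_eq_getElem, List.getD_eq_getElem?_getD, List.getElem?_eq_getElem (by omega)]
  simp

theorem starIdx_getD_lt (cs : List Char) (i j : Nat) (hij : i < j)
    (hj : j < (starIdx cs).length) :
    (starIdx cs).getD i 0 < (starIdx cs).getD j 0 := by
  have h := List.pairwise_iff_getElem.1 (starIdx_pairwise cs) i j (by omega) hj hij
  rw [List.getD_eq_getElem _ _ (by omega), List.getD_eq_getElem _ _ hj]
  exact h

theorem starIdx_getD_mem (cs : List Char) (t : Nat) (ht : t < (starIdx cs).length) :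
    (starIdx cs).getD t 0 ∈ starIdx cs := by
  rw [List.getD_eq_getElem _ _ ht]
  exact List.getElem_mem ht

theorem scan_down (cs : List Char) : ∀ (fuel j m : Nat), m ≤ j → j < cs.length →
    m ∈ starIdx cs → (∀ x, m < x → x ≤ j → x ∉ starIdx cs) → j - m < fuel →
    scanBackA cs (j : Int) fuel = some (m : Int) := by
  intro fuel
  induction fuel with
  | zero => intro j m _ _ _ _ hf; omega
  | succ f ih =>
    intro j m hmj hj hm hno hf
    have hget : PySem.List.pyGet? cs ((j : Nat) : Int) = cs[j]? := PySem.List.pyGet?_natCast _ _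
    by_cases hsj : j ∈ starIdx cs
    · have hmj' : m = j := by
        by_contra hc
        exact hno j (by omega) le_rfl hsj
      have hstar : cs[j]? = some '*' := (getElem?_star_iff cs j).2 hsj
      subst hmj'
      simp [scanBackA, hget, hstar]
    · have hne : cs[j]? = some cs[j] := List.getElem?_eq_getElem hj
      have hcj : ¬ (cs[j] = '*') := by
        intro hc
        exact hsj ((getElem?_star_iff cs j).1 (by rw [hne, hc]))
      have hmlt : m < j := by
        rcases Nat.lt_or_ge m j with h | h
        · exact h
        · exact absurd (by omega : m = j) (fun hc => hsj (hc ▸ hm))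
      have hcast : ((j : Nat) : Int) - 1 = (((j - 1 : Nat)) : Int) := by omega
      rw [scanBackA, hget, hne]
      simp only [if_neg hcj]
      rw [hcast]
      exact ih (j-1) m (by omega) (by omega) hm (fun x h1 h2 => hno x h1 (by omega)) (by omega)

theorem innerB_spec (pos : List Int) (bound : Int) (last : Nat) :
    ∀ (fuel j : Nat), j ≤ last → last - j ≤ fuel → pos.getD j 0 ≤ bound →
    j ≤ innerB pos bound last j fuel ∧ innerB pos bound last j fuel ≤ last ∧
      pos.getD (innerB pos bound last j fuel) 0 ≤ bound ∧
      (innerB pos bound last j fuel = last ∨ ¬ pos.getD (innerB pos bound last j fuel + 1) 0 ≤ bound) := by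
  intro fuel
  induction fuel with
  | zero =>
    intro j hj hf hb
    have hjl : j = last := by omega
    exact ⟨le_rfl, hj, hb, Or.inl (by simp [innerB, hjl])⟩
  | succ f ih =>
    intro j hj hf hb
    by_cases hc : j + 1 ≤ last ∧ pos.getD (j+1) 0 ≤ bound
    · rw [innerB, if_pos hc]
      obtain ⟨h1, h2, h3, h4⟩ := ih (j+1) hc.1 (by omega) hc.2
      exact ⟨by omega, h2, h3, h4⟩
    · rw [innerB, if_neg hc]
      refine ⟨le_rfl, hj, hb, ?_⟩
      rcases Nat.lt_or_ge j last with h | h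
      · right; intro hle; exact hc ⟨by omega, hle⟩
      · left; omega

-- the main simulation: A's loop over character positions equals B's loop over star indices
theorem loop_sim (cs : List Char) (k : Int) (hk : 1 ≤ k)
    (hgap : ∀ i, i + 1 < (starIdx cs).length →
      (((starIdx cs).getD (i+1) 0 : Int) ≤ ((starIdx cs).getD i 0 : Int) + k))
    (hne : starIdx cs ≠ []) :
    ∀ (fuelA : Nat) (t : Nat) (count : Int) (fuelB : Nat),
      t ≤ (starIdx cs).length - 1 →
      (starIdx cs).length - t ≤ fuelA → (starIdx cs).length - t ≤ fuelB →
      loopA cs k ((starIdx cs).getLast hne : Int)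
        (((starIdx cs).map (fun (j : Nat) => (j : Int))).getD t 0) count fuelA =
      loopB ((starIdx cs).map (fun (j : Nat) => (j : Int))) k ((starIdx cs).length - 1) t count fuelB := by
  intro fuelA
  induction fuelA with
  | zero =>
    intro t count fuelB ht hfa _
    have hlen : 0 < (starIdx cs).length := List.length_pos_of_ne_nil hne
    omega
  | succ fA ih =>
    intro t count fuelB ht hfa hfb
    have hlen : 0 < (starIdx cs).length := List.length_pos_of_ne_nil hne
    cases fuelB with
    | zero => omega
    | succ fB =>
      have hL : ((starIdx cs).getLast hne : Int)
          = (((starIdx cs).getD ((starIdx cs).length - 1) 0 : Nat) : Int) := by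
        rw [getLast_eq_getD]
      rcases Nat.lt_or_ge t ((starIdx cs).length - 1) with htl | htl
      · -- t < last : both loops take a step
        have ht1 : t < (starIdx cs).length := by omega
        have hcondA : (((starIdx cs).getD t 0 : Nat) : Int) < ((starIdx cs).getLast hne : Int) := by
          rw [hL]
          exact_mod_cast starIdx_getD_lt cs t ((starIdx cs).length - 1) htl (by omega)
        have hstar : PySem.List.pyGet? cs (((starIdx cs).getD t 0 : Nat) : Int) = some '*' := by
          rw [PySem.List.pyGet?_natCast]
          exact (getElem?_star_iff cs _).2 (starIdx_getD_mem cs t ht1)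
        have hbase : ((starIdx cs).map (fun (j : Nat) => (j : Int))).getD t 0
            ≤ (((starIdx cs).getD t 0 : Nat) : Int) + k := by
          rw [map_getD _ _ ht1]; omega
        obtain ⟨h1, h2, h3, h4⟩ :=
          innerB_spec ((starIdx cs).map (fun (j : Nat) => (j : Int)))
            ((((starIdx cs).getD t 0 : Nat) : Int) + k) ((starIdx cs).length - 1)
            ((starIdx cs).length - 1) t (by omega) (by omega) hbase
        set t' := innerB ((starIdx cs).map (fun (j : Nat) => (j : Int)))
          ((((starIdx cs).getD t 0 : Nat) : Int) + k) ((starIdx cs).length - 1) t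
          ((starIdx cs).length - 1) with ht'
        have ht'1 : t' < (starIdx cs).length := by omega
        have hgapt : (((starIdx cs).getD (t+1) 0 : Nat) : Int)
            ≤ (((starIdx cs).getD t 0 : Nat) : Int) + k := hgap t (by omega)
        have hprog : t + 1 ≤ t' := by
          by_contra hc
          have htt : t' = t := by omega
          rcases h4 with h4 | h4
          · omega
          · rw [htt, map_getD _ _ (by omega : t + 1 < (starIdx cs).length)] at h4
            exact h4 hgapt
        have h3' : (((starIdx cs).getD t' 0 : Nat) : Int)
            ≤ (((starIdx cs).getD t 0 : Nat) : Int) + k := by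
          rw [map_getD _ _ ht'1] at h3; exact h3
        have hscan : scanBackA cs
            (min ((cs.length : Int) - 1) ((((starIdx cs).getD t 0 : Nat) : Int) + k))
            (2 * cs.length + 2) = some (((starIdx cs).getD t' 0 : Nat) : Int) := by
          have hmem' : (starIdx cs).getD t' 0 ∈ starIdx cs := starIdx_getD_mem cs t' ht'1
          have hmn : (starIdx cs).getD t' 0 < cs.length := ((mem_starIdx cs _).1 hmem').1
          obtain ⟨jn, hjn⟩ : ∃ jn : Nat,
              min ((cs.length : Int) - 1) ((((starIdx cs).getD t 0 : Nat) : Int) + k) = (jn : Int) :=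
            ⟨(min ((cs.length : Int) - 1) ((((starIdx cs).getD t 0 : Nat) : Int) + k)).toNat,
              by omega⟩
          rw [hjn]
          apply scan_down cs (2 * cs.length + 2) jn ((starIdx cs).getD t' 0)
            (by omega) (by omega) hmem'
          · intro x hx1 hx2 hxmem
            obtain ⟨u, hu, hux⟩ := List.getElem_of_mem hxmem
            have hux' : (starIdx cs).getD u 0 = x := by rw [List.getD_eq_getElem _ _ hu, hux]
            have hut : t' < u := by
              by_contra hc
              have hle : (starIdx cs).getD u 0 ≤ (starIdx cs).getD t' 0 := by
                rcases Nat.lt_or_ge u t' with h | h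
                · exact Nat.le_of_lt (starIdx_getD_lt cs u t' h ht'1)
                · have : u = t' := by omega
                  rw [this]
              omega
            rcases h4 with h4 | h4
            · omega
            · rw [map_getD _ _ (by omega : t' + 1 < (starIdx cs).length)] at h4
              have hle : (starIdx cs).getD (t'+1) 0 ≤ (starIdx cs).getD u 0 := by
                rcases Nat.lt_or_ge (t'+1) u with h | h
                · exact Nat.le_of_lt (starIdx_getD_lt cs (t'+1) u h hu)
                · have : t' + 1 = u := by omega
                  rw [this]
              have hxj : (x : Int) ≤ (jn : Int) := by exact_mod_cast hx2
              omega
          · omega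
        rw [loopA, loopB]
        rw [map_getD _ _ ht1]
        rw [if_pos hcondA, if_pos (by omega : t < (starIdx cs).length - 1)]
        simp only [hstar, hscan]
        simp only [reduceIte]
        have hnext : (((starIdx cs).getD t' 0 : Nat) : Int)
            = ((starIdx cs).map (fun (j : Nat) => (j : Int))).getD t' 0 := by
          rw [map_getD _ _ ht'1]
        rw [hnext]
        exact ih t' (count + 1) fB (by omega) (by omega) (by omega)
      · -- t = last : both loops stop
        rw [loopA, loopB]
        rw [map_getD _ _ (by omega : t < (starIdx cs).length)]
        have hstop : ¬ (((starIdx cs).getD t 0 : Nat) : Int) < ((starIdx cs).getLast hne : Int) := by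
          rw [(by omega : t = (starIdx cs).length - 1), hL]
          omega
        rw [if_neg hstop, if_neg (by omega : ¬ t < (starIdx cs).length - 1)]

-- ===== VERDICT (by name: the statement is the Claim_ definition above) =====
theorem answer_spec : Claim_equal_answer := by
  unfold Claim_equal_answer
  intro st k _ hpre
  unfold Spec_answer
  have hpre' : (starIdx st.toList).length ≤ 1 ∨
      (1 ≤ k ∧ ∀ i ∈ List.range ((starIdx st.toList).length - 1),
        (((starIdx st.toList).getD (i+1) 0 : Nat) : Int)
          ≤ (((starIdx st.toList).getD i 0 : Nat) : Int) + k) := hpre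
  simp only [answer, answer_alt]
  have hfind : PySem.Str.find st "*" = PySem.Chars.find st.toList ['*'] := by
    rw [PySem.Str.find_eq]; rfl
  have hrfind : PySem.Str.rfind st "*"
      = PySem.Chars.rfind.go st.toList ['*'] st.toList.length := by
    rw [PySem.Str.rfind_eq]; rfl
  by_cases hnil : starIdx st.toList = []
  · -- no star at all: both sides are 1
    have hf : PySem.Str.find st "*" = -1 := by rw [hfind, find_star_empty _ hnil]
    have hrf : PySem.Str.rfind st "*" = -1 := by
      rw [hrfind, rfindGo_neg _ _ (by rw [hnil]; simp)]
    rw [hf, hrf, hnil]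
    rw [loopA]
    norm_num
  · obtain ⟨h0, tl, hcase⟩ := List.exists_cons_of_ne_nil hnil
    have hne : starIdx st.toList ≠ [] := hnil
    have hlen : 0 < (starIdx st.toList).length := List.length_pos_of_ne_nil hne
    have hf : PySem.Str.find st "*" = ((h0 : Nat) : Int) := by
      rw [hfind, find_star_cons _ _ _ hcase]
    have hLmem := List.getLast_mem hne
    have hrf : PySem.Str.rfind st "*" = (((starIdx st.toList).getLast hne : Nat) : Int) := by
      rw [hrfind]
      exact rfindGo_pos _ _ _ hLmem (Nat.le_of_lt ((mem_starIdx _ _).1 hLmem).1)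
        (fun j hj _ => pairwise_le_getLast (starIdx_pairwise _) hj hne)
    by_cases hone : (starIdx st.toList).length ≤ 1
    · -- exactly one star: both sides are 1
      have hlc := congrArg List.length hcase
      simp only [List.length_cons] at hlc
      have htl : tl = [] := List.length_eq_zero_iff.1 (by omega)
      subst htl
      have hgetD : (starIdx st.toList).getD ((starIdx st.toList).length - 1) 0 = h0 := by
        rw [hcase]
        rfl
      have hL0 : (((starIdx st.toList).getLast hne : Nat) : Int) = ((h0 : Nat) : Int) := by
        rw [getLast_eq_getD _ hne, hgetD]
      rw [hf, hrf, hL0, hcase]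
      rw [loopA]
      norm_num
    · -- at least two stars: run the simulation
      rcases hpre' with h | ⟨hk, hgap0⟩
      · omega
      have hgap : ∀ i, i + 1 < (starIdx st.toList).length →
          (((starIdx st.toList).getD (i+1) 0 : Nat) : Int)
            ≤ (((starIdx st.toList).getD i 0 : Nat) : Int) + k :=
        fun i hi => hgap0 i (List.mem_range.2 (by omega))
      have hsim := loop_sim st.toList k hk hgap hne (st.toList.length + 1) 0 1
        ((starIdx st.toList).length)
        (by omega) (by have := starIdx_length_le st.toList; omega) (by omega)
      have h00 : ((starIdx st.toList).map (fun (j : Nat) => (j : Int))).getD 0 0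
          = ((h0 : Nat) : Int) := by
        rw [map_getD _ _ (by omega), hcase]
        rfl
      rw [h00] at hsim
      rw [hf, hrf, hsim]
      simp only [List.length_map]
      rw [if_neg (by omega)]
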